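-- pv_equiv track=rewrite | github.com/caderek/aoc2024 | src/day12/index.py | isolate_region
-- ===== SOURCE A (Python) =====
-- def isolate_region(points):
--     min_y = min([y for y, _ in points])
--     min_x = min([x for _, x in points])
--     h = max([y for y, _ in points]) - min_y + 1
--     w = max([x for _, x in points]) - min_x + 1
--     region = [['.' for _ in range(w + 1)] for _ in range(h + 1)]
--
--     for y, x in points:
--         region[y - min_y][x - min_x] = 'O'
--
--     return region
-- ===== SOURCE B (Python) =====
-- def isolate_region(points):
--     if not points:
--         raise ValueError("min() arg is an empty sequence")
--     y0, x0 = points[0]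
--     min_y = max_y = y0
--     min_x = max_x = x0
--     for y, x in points[1:]:
--         if y < min_y:
--             min_y = y
--         if y > max_y:
--             max_y = y
--         if x < min_x:
--             min_x = x
--         if x > max_x:
--             max_x = x
--     h = max_y - min_y + 1
--     w = max_x - min_x + 1
--     pts = set(points)
--     return [['O' if (y + min_y, x + min_x) in pts else '.'
--              for x in range(w + 1)]
--             for y in range(h + 1)]
-- ===== Notes on version B (the rewrite author's own statement) =====
-- stated objective: alternative
-- what changed: B computes all four bounds in one pass and then builds the grid directly by a comprehension testing membership in a set of the points, instead of A's four separate min/max scans followed by in-place mutation of a pre-built dot grid.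
import Mathlib
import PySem

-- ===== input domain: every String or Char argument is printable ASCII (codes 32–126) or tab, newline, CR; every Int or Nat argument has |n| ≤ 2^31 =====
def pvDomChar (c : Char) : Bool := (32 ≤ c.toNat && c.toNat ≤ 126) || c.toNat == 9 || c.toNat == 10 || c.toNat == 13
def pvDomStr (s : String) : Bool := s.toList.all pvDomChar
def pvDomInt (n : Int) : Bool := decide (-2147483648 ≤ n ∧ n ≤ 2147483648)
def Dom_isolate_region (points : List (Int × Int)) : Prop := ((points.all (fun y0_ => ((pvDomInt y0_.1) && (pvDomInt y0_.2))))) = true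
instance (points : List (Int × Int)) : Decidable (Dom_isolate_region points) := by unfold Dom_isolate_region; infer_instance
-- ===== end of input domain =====

-- B computes all four bounds in one pass and builds the grid by a comprehension testing
-- membership in the set of points, instead of A's four min/max scans plus in-place fills.


-- ===== PORT A =====
-- A-side helper: the fill loop 'for y, x in points: region[y-min_y][x-min_x] = "O"'
def fillA (my mx : Int) (pts : List (Int × Int)) (reg : List (List String)) : List (List String) :=
  pts.foldl (fun reg p =>
    PySem.List.pySetD reg (p.1 - my)
      (PySem.List.pySetD (PySem.List.pyGetD reg (p.1 - my) []) (p.2 - mx) "O")) reg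

def isolate_region (points : List (Int × Int)) : List (List String) :=
  match PySem.List.min? (points.map (fun p => p.1)) (fun y => y),
        PySem.List.min? (points.map (fun p => p.2)) (fun x => x),
        PySem.List.max? (points.map (fun p => p.1)) (fun y => y),
        PySem.List.max? (points.map (fun p => p.2)) (fun x => x) with
  | some min_y, some min_x, some may, some max_ =>
      let h := may - min_y + 1
      let w := max_ - min_x + 1
      let region := (PySem.List.pyRange 0 (h + 1) 1).map
        (fun _ => (PySem.List.pyRange 0 (w + 1) 1).map (fun _ => "."))
      fillA min_y min_x points region
  | _, _, _, _ => []   -- Python: min() of an empty sequence raises ValueError (excluded by Pre_)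

-- ===== PORT B =====
def isolate_region_alt (points : List (Int × Int)) : List (List String) :=
  match points with
  | [] => []   -- Python B raises ValueError here (excluded by Pre_)
  | (y0, x0) :: rest =>
      let b := rest.foldl (fun (b : Int × Int × Int × Int) p =>
        (if p.1 < b.1 then p.1 else b.1,
         if p.2 < b.2.1 then p.2 else b.2.1,
         if p.1 > b.2.2.1 then p.1 else b.2.2.1,
         if p.2 > b.2.2.2 then p.2 else b.2.2.2)) (y0, x0, y0, x0)
      let min_y := b.1
      let min_x := b.2.1
      let h := b.2.2.1 - min_y + 1
      let w := b.2.2.2 - min_x + 1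
      let pts := PySem.Set.ofList points
      (PySem.List.pyRange 0 (h + 1) 1).map (fun y =>
        (PySem.List.pyRange 0 (w + 1) 1).map (fun x =>
          if (y + min_y, x + min_x) ∈ pts then "O" else "."))

-- ===== PRECONDITION & SPEC =====
-- Pre_ excludes only the empty list, on which both Pythons raise ValueError (min of empty sequence).
def Pre_isolate_region (points : List (Int × Int)) : Prop := points ≠ []
instance (points : List (Int × Int)) : Decidable (Pre_isolate_region points) := by unfold Pre_isolate_region; infer_instance
def pvWitness_isolate_region : (List (Int × Int)) := [(2, 3), (1, 3)]

def Spec_isolate_region (points : List (Int × Int)) (out : List (List String)) : Prop := out = isolate_region_alt points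
instance (points : List (Int × Int)) (out : List (List String)) : Decidable (Spec_isolate_region points out) := by unfold Spec_isolate_region; infer_instance

-- ===== CLAIM (what is proved, stated in full; the proofs are below) =====
def Claim_equal_isolate_region : Prop := ∀ (points : List (Int × Int)), Dom_isolate_region points → Pre_isolate_region points → Spec_isolate_region points (isolate_region points)

-- ===== LEMMAS AND PROOFS =====

-- B's quadruple fold projects to the four separate running min/max folds.
lemma bounds_fold (rest : List (Int × Int)) : ∀ a b c d : Int,
    rest.foldl (fun (b : Int × Int × Int × Int) p =>
      (if p.1 < b.1 then p.1 else b.1,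
       if p.2 < b.2.1 then p.2 else b.2.1,
       if p.1 > b.2.2.1 then p.1 else b.2.2.1,
       if p.2 > b.2.2.2 then p.2 else b.2.2.2)) (a, b, c, d)
    = (rest.foldl (fun m q => min m q.1) a,
       rest.foldl (fun m q => min m q.2) b,
       rest.foldl (fun m q => max m q.1) c,
       rest.foldl (fun m q => max m q.2) d) := by
  induction rest with
  | nil => intro a b c d; rfl
  | cons p t ih =>
      intro a b c d
      simp only [List.foldl_cons, ih]
      have e1 : (if p.1 < a then p.1 else a) = min a p.1 := by omega
      have e2 : (if p.2 < b then p.2 else b) = min b p.2 := by omega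
      have e3 : (if p.1 > c then p.1 else c) = max c p.1 := by omega
      have e4 : (if p.2 > d then p.2 else d) = max d p.2 := by omega
      rw [e1, e2, e3, e4]

-- entry g r c = g[r][c] as an Option
def entry (g : List (List String)) (r c : Nat) : Option String := (g[r]?.getD [])[c]?

lemma fill_spec (my mx : Int) : ∀ (pts : List (Int × Int)) (reg : List (List String)) (W : Nat),
    (∀ row ∈ reg, row.length = W) →
    (∀ p ∈ pts, 0 ≤ p.1 - my ∧ (p.1 - my).toNat < reg.length ∧ 0 ≤ p.2 - mx ∧ (p.2 - mx).toNat < W) →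
    (fillA my mx pts reg).length = reg.length ∧
    (∀ row ∈ fillA my mx pts reg, row.length = W) ∧
    ∀ r c : Nat,
      entry (fillA my mx pts reg) r c =
        if (∃ p ∈ pts, p.1 - my = (r : Int) ∧ p.2 - mx = (c : Int)) then
          (if c < W then some "O" else none)
        else entry reg r c := by
  intro pts
  induction pts with
  | nil =>
      intro reg W hrow _
      refine ⟨rfl, hrow, ?_⟩
      intro r c; simp [fillA]
  | cons p t ih =>
      intro reg W hrow hin
      have hp := hin p (List.mem_cons_self ..)
      obtain ⟨h1, h2, h3, h4⟩ := hp
      -- the grid after the first write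
      set rn : Nat := (p.1 - my).toNat with hrn
      set cn : Nat := (p.2 - mx).toNat with hcn
      have hrowlen : (reg[rn]'h2).length = W := hrow _ (List.getElem_mem h2)
      have hstep : (fillA my mx (p :: t) reg) =
          fillA my mx t (reg.set rn ((reg[rn]'h2).set cn "O")) := by
        simp only [fillA, List.foldl_cons]
        congr 1
        rw [PySem.List.pySetD_of_nonneg _ _ h1, PySem.List.pyGetD_eq_getElem _ _ h1 (by omega)]
        rw [PySem.List.pySetD_of_nonneg _ _ h3]
      set reg' := reg.set rn ((reg[rn]'h2).set cn "O") with hreg'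
      have hrow' : ∀ row ∈ reg', row.length = W := by
        intro row hm
        rcases List.mem_or_eq_of_mem_set hm with h | h
        · exact hrow _ h
        · subst h; simp [hrowlen]
      have hlen' : reg'.length = reg.length := by simp [hreg']
      have hin' : ∀ q ∈ t, 0 ≤ q.1 - my ∧ (q.1 - my).toNat < reg'.length ∧ 0 ≤ q.2 - mx ∧ (q.2 - mx).toNat < W := by
        intro q hq
        have := hin q (List.mem_cons_of_mem _ hq)
        omega
      obtain ⟨l1, l2, l3⟩ := ih reg' W hrow' hin'
      rw [hstep]
      refine ⟨by rw [l1, hlen'], l2, ?_⟩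
      intro r c
      rw [l3 r c]
      have hentry' : entry reg' r c =
          if r = rn ∧ c = cn then some "O" else entry reg r c := by
        by_cases hr : r = rn
        · have hrget : reg'[r]? = some ((reg[rn]'h2).set cn "O") := by
            rw [hreg', hr]; exact List.getElem?_set_self (by omega)
          have hregget : reg[r]? = some (reg[rn]'h2) := by
            rw [hr]; exact List.getElem?_eq_getElem h2
          by_cases hc : c = cn
          · rw [if_pos ⟨hr, hc⟩]
            simp only [entry, hrget, Option.getD_some, hc]
            exact List.getElem?_set_self (by omega)
          · rw [if_neg (by tauto)]
            simp only [entry, hrget, hregget, Option.getD_some]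
            exact List.getElem?_set_ne (by omega)
        · rw [if_neg (by tauto)]
          simp only [entry, hreg', List.getElem?_set_ne (fun h => hr h.symm)]
      by_cases hex : ∃ q ∈ t, q.1 - my = (r : Int) ∧ q.2 - mx = (c : Int)
      · have : ∃ q ∈ p :: t, q.1 - my = (r : Int) ∧ q.2 - mx = (c : Int) := by
          obtain ⟨q, hq, hqe⟩ := hex
          exact ⟨q, List.mem_cons_of_mem _ hq, hqe⟩
        rw [if_pos hex, if_pos this]
      · rw [if_neg hex, hentry']
        by_cases hpc : r = rn ∧ c = cn
        · have : ∃ q ∈ p :: t, q.1 - my = (r : Int) ∧ q.2 - mx = (c : Int) :=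
            ⟨p, List.mem_cons_self .., by omega⟩
          rw [if_pos hpc, if_pos this, if_pos (by omega)]
        · have : ¬ ∃ q ∈ p :: t, q.1 - my = (r : Int) ∧ q.2 - mx = (c : Int) := by
            rintro ⟨q, hq, hqe⟩
            rcases List.mem_cons.mp hq with h | h
            · subst h; omega
            · exact hex ⟨q, h, hqe⟩
          rw [if_neg hpc, if_neg this]

-- ===== VERDICT (by name: the statement is the Claim_ definition above) =====
theorem isolate_region_spec : Claim_equal_isolate_region := by
  intro points _ hpre
  unfold Spec_isolate_region
  obtain ⟨⟨y0, x0⟩, rest, rfl⟩ : ∃ p r, points = p :: r := by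
    cases points with
    | nil => exact absurd rfl hpre
    | cons p r => exact ⟨p, r, rfl⟩
  set MY := rest.foldl (fun m q => min m q.1) y0 with hMY
  set MX := rest.foldl (fun m q => min m q.2) x0 with hMX
  set MAY := rest.foldl (fun m q => max m q.1) y0 with hMAY
  set MAX := rest.foldl (fun m q => max m q.2) x0 with hMAX
  have hmy : PySem.List.min? (((y0,x0) :: rest).map (fun p => p.1)) (fun y => y) = some MY := by
    rw [List.map_cons, PySem.List.min?_id_cons, List.foldl_map]
  have hmx : PySem.List.min? (((y0,x0) :: rest).map (fun p => p.2)) (fun x => x) = some MX := by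
    rw [List.map_cons, PySem.List.min?_id_cons, List.foldl_map]
  have hmay : PySem.List.max? (((y0,x0) :: rest).map (fun p => p.1)) (fun y => y) = some MAY := by
    rw [List.map_cons, PySem.List.max?_id_cons, List.foldl_map]
  have hmax : PySem.List.max? (((y0,x0) :: rest).map (fun p => p.2)) (fun x => x) = some MAX := by
    rw [List.map_cons, PySem.List.max?_id_cons, List.foldl_map]
  -- bounds of every point
  have hbnd : ∀ p ∈ (y0,x0) :: rest, MY ≤ p.1 ∧ p.1 ≤ MAY ∧ MX ≤ p.2 ∧ p.2 ≤ MAX := by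
    intro p hp
    have h1 := PySem.List.min?_isMin hmy p.1 (List.mem_map_of_mem hp)
    have h2 := PySem.List.max?_isMax hmay p.1 (List.mem_map_of_mem hp)
    have h3 := PySem.List.min?_isMin hmx p.2 (List.mem_map_of_mem hp)
    have h4 := PySem.List.max?_isMax hmax p.2 (List.mem_map_of_mem hp)
    exact ⟨h1, h2, h3, h4⟩
  have hyy : MY ≤ MAY := by
    have := hbnd (y0,x0) (List.mem_cons_self ..); omega
  have hxx : MX ≤ MAX := by
    have := hbnd (y0,x0) (List.mem_cons_self ..); omega
  -- reduce A
  unfold isolate_region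
  rw [hmy, hmx, hmay, hmax]
  -- reduce B
  show fillA MY MX ((y0,x0) :: rest)
      ((PySem.List.pyRange 0 (MAY - MY + 1 + 1) 1).map
        (fun _ => (PySem.List.pyRange 0 (MAX - MX + 1 + 1) 1).map (fun _ => "."))) =
    isolate_region_alt ((y0,x0) :: rest)
  have hB : isolate_region_alt ((y0,x0) :: rest) =
      (PySem.List.pyRange 0 (MAY - MY + 1 + 1) 1).map (fun y =>
        (PySem.List.pyRange 0 (MAX - MX + 1 + 1) 1).map (fun x =>
          if (y + MY, x + MX) ∈ PySem.Set.ofList ((y0,x0) :: rest) then "O" else ".")) := by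
    simp only [isolate_region_alt, bounds_fold]
    rfl
  rw [hB]
  set H : Nat := (MAY - MY + 1 + 1 - 0).toNat with hH
  set W : Nat := (MAX - MX + 1 + 1 - 0).toNat with hW
  set row0 := (PySem.List.pyRange 0 (MAX - MX + 1 + 1) 1).map (fun _ => ".") with hrow0
  set reg0 := (PySem.List.pyRange 0 (MAY - MY + 1 + 1) 1).map
      (fun _ : Int => row0) with hreg0
  have hrow0len : row0.length = W := by
    rw [hrow0, List.length_map, PySem.List.length_pyRange_one]
  have hreg0len : reg0.length = H := by
    rw [hreg0, List.length_map, PySem.List.length_pyRange_one]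
  have hrows : ∀ row ∈ reg0, row.length = W := by
    intro row hm
    obtain ⟨_, _, rfl⟩ := List.mem_map.mp hm
    exact hrow0len
  have hin : ∀ p ∈ (y0,x0) :: rest,
      0 ≤ p.1 - MY ∧ (p.1 - MY).toNat < reg0.length ∧ 0 ≤ p.2 - MX ∧ (p.2 - MX).toNat < W := by
    intro p hp
    have := hbnd p hp
    rw [hreg0len]
    omega
  obtain ⟨l1, l2, l3⟩ := fill_spec MY MX ((y0,x0) :: rest) reg0 W hrows hin
  -- cell-wise equality
  apply List.ext_getElem?
  intro r
  by_cases hr : r < H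
  · have hL : ∃ rowL, (fillA MY MX ((y0,x0) :: rest) reg0)[r]? = some rowL := by
      exact ⟨_, List.getElem?_eq_getElem (by omega)⟩
    obtain ⟨rowL, hrowL⟩ := hL
    have hrowLlen : rowL.length = W :=
      l2 rowL (List.mem_of_getElem? hrowL)
    have hG : (PySem.List.pyRange 0 (MAY - MY + 1 + 1) 1)[r]? = some ((0 : Int) + (r : Int)) := by
      rw [PySem.List.pyRange_one]
      rw [List.getElem?_map, List.getElem?_range (by omega)]
      rfl
    rw [hrowL, List.getElem?_map, hG]
    simp only [Option.map_some]
    congr 1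
    apply List.ext_getElem?
    intro c
    have hcell : rowL[c]? = entry (fillA MY MX ((y0,x0) :: rest) reg0) r c := by
      simp only [entry, hrowL, Option.getD_some]
    rw [hcell, l3 r c]
    have hcond : (∃ p ∈ (y0,x0) :: rest, p.1 - MY = (r : Int) ∧ p.2 - MX = (c : Int)) ↔
        (((0:Int) + (r:Int)) + MY, ((0:Int) + (c:Int)) + MX) ∈ PySem.Set.ofList ((y0,x0) :: rest) := by
      rw [PySem.Set.mem_ofList]
      constructor
      · rintro ⟨p, hp, h1, h2⟩
        have : p = (((0:Int) + (r:Int)) + MY, ((0:Int) + (c:Int)) + MX) := by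
          obtain ⟨a, b⟩ := p
          simp only [Prod.mk.injEq]
          constructor <;> [skip; skip] <;> simp only at h1 h2 <;> omega
        rw [← this]; exact hp
      · intro hm
        exact ⟨_, hm, by simp, by simp⟩
    by_cases hc : c < W
    · have hRc : ((PySem.List.pyRange 0 (MAX - MX + 1 + 1) 1).map (fun x =>
          if (((0:Int) + (r:Int)) + MY, x + MX) ∈ PySem.Set.ofList ((y0,x0) :: rest) then "O" else "."))[c]? =
          some (if (((0:Int) + (r:Int)) + MY, ((0:Int) + (c:Int)) + MX) ∈ PySem.Set.ofList ((y0,x0) :: rest) then "O" else ".") := by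
        rw [List.getElem?_map, PySem.List.pyRange_one, List.getElem?_map,
          List.getElem?_range (by omega)]
        rfl
      rw [hRc]
      have hreg0cell : entry reg0 r c = some "." := by
        have : reg0[r]? = some row0 := by
          rw [hreg0, List.getElem?_map, PySem.List.pyRange_one, List.getElem?_map,
            List.getElem?_range (by omega)]
          rfl
        simp only [entry, this, Option.getD_some, hrow0, List.getElem?_map,
          PySem.List.pyRange_one, List.getElem?_range (by omega : c < ((MAX - MX + 1 + 1 - 0).toNat))]
        rfl
      by_cases hex : ∃ p ∈ (y0,x0) :: rest, p.1 - MY = (r : Int) ∧ p.2 - MX = (c : Int)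
      · rw [if_pos hex, if_pos hc, if_pos (hcond.mp hex)]
      · rw [if_neg hex, hreg0cell, if_neg (fun hm => hex (hcond.mpr hm))]
    · -- both sides none past the row width
      have hRc : ((PySem.List.pyRange 0 (MAX - MX + 1 + 1) 1).map (fun x =>
          if (((0:Int) + (r:Int)) + MY, x + MX) ∈ PySem.Set.ofList ((y0,x0) :: rest) then "O" else "."))[c]? = none := by
        apply List.getElem?_eq_none
        rw [List.length_map, PySem.List.length_pyRange_one]
        omega
      rw [hRc]
      have hreg0cell : entry reg0 r c = none := by
        have : reg0[r]? = some row0 := by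
          rw [hreg0, List.getElem?_map, PySem.List.pyRange_one, List.getElem?_map,
            List.getElem?_range (by omega)]
          rfl
        simp only [entry, this, Option.getD_some]
        apply List.getElem?_eq_none
        omega
      split
      all_goals simp [hreg0cell]
  · rw [List.getElem?_eq_none (by omega : (fillA MY MX ((y0,x0) :: rest) reg0).length ≤ r),
      List.getElem?_eq_none]
    rw [List.length_map, PySem.List.length_pyRange_one]
    omega
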